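-- pv_equiv track=rewrite | github.com/daniel-reich/ubiquitous-fiesta | YcqAY72nZNPtvofuJ_23.py | quad_sequence
-- ===== SOURCE A (Python) =====
-- def quad_sequence(lst):
--     L = len(lst)
--     newlst = [lst[0]]
--     firstDiff = lst[1] - lst[0]
--     nextDiff = lst[2] - lst[1]
--     secondDiff = nextDiff - firstDiff
--     nextnum = firstDiff + lst[0]
--     newlst.append(nextnum)
--     for x in range( 1, 2 * len(lst) - 1):
--         firstDiff = nextnum - newlst[x-1]
--         nextDiff = secondDiff + firstDiff
--         nextnum = nextDiff + nextnum
--         newlst.append(nextnum)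
--     return newlst[-L:]
-- ===== SOURCE B (Python) =====
-- def quad_sequence(lst):
--     L = len(lst)
--     d1 = lst[1] - lst[0]
--     d2 = (lst[2] - lst[1]) - d1
--     return [lst[0] + n * d1 + d2 * (n * (n - 1) // 2) for n in range(L, 2 * L)]
-- ===== Notes on version B (the rewrite author's own statement) =====
-- stated objective: simpler
-- what changed: Replaces A's term-by-term second-difference recurrence over a growing list (with repeated indexing into it) by evaluating the closed quadratic form lst[0] + n*d1 + d2*(n*(n-1)//2) directly for each n in range(L, 2*L).
import Mathlib
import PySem

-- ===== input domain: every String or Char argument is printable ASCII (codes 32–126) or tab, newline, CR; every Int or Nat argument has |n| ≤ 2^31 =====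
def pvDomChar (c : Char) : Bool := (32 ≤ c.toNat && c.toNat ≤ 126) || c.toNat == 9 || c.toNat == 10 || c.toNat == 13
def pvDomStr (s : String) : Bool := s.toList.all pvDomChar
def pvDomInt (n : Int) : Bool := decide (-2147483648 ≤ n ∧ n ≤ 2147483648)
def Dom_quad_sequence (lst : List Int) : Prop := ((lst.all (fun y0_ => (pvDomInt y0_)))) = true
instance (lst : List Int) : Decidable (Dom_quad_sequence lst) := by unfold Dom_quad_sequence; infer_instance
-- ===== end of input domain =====

-- B replaces A's second-difference recurrence over a growing list by evaluating the closed
-- quadratic form lst[0] + n*d1 + d2*(n*(n-1)//2) directly for n in range(L, 2*L) (objective: simpler).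

-- ===== PORT A =====
def quad_sequence (lst : List Int) : List Int :=
  let L : Int := PySem.List.len lst
  let newlst : List Int := [PySem.List.pyGetD lst 0 0]
  let firstDiff : Int := PySem.List.pyGetD lst 1 0 - PySem.List.pyGetD lst 0 0
  let nextDiff : Int := PySem.List.pyGetD lst 2 0 - PySem.List.pyGetD lst 1 0
  let secondDiff : Int := nextDiff - firstDiff
  let nextnum : Int := firstDiff + PySem.List.pyGetD lst 0 0
  let newlst := newlst ++ [nextnum]
  -- for x in range(1, 2*len(lst)-1): state = (newlst, nextnum); newlst[x-1] is always in
  -- range here (the list has x+1 elements when iteration x runs), so pyGetD's default is dead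
  let st := (PySem.List.pyRange 1 (2 * PySem.List.len lst - 1) 1).foldl
    (fun (st : List Int × Int) x =>
      let firstDiff := st.2 - PySem.List.pyGetD st.1 (x - 1) 0
      let nextDiff := secondDiff + firstDiff
      let nextnum := nextDiff + st.2
      (st.1 ++ [nextnum], nextnum))
    (newlst, nextnum)
  PySem.List.slice st.1 (some (-L)) none

-- ===== PORT B =====
def quad_sequence_alt (lst : List Int) : List Int :=
  let L : Int := PySem.List.len lst
  let a0 : Int := PySem.List.pyGetD lst 0 0
  let d1 : Int := PySem.List.pyGetD lst 1 0 - a0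
  let d2 : Int := (PySem.List.pyGetD lst 2 0 - PySem.List.pyGetD lst 1 0) - d1
  (PySem.List.pyRange L (2 * L) 1).map
    (fun n => a0 + n * d1 + d2 * PySem.Int.floordiv (n * (n - 1)) 2)

-- ===== PRECONDITION & SPEC =====
-- A reads lst[2] before its loop, so it raises IndexError for every list shorter than 3 (B likewise).
def Pre_quad_sequence (lst : List Int) : Prop := 3 ≤ lst.length
instance (lst : List Int) : Decidable (Pre_quad_sequence lst) := by unfold Pre_quad_sequence; infer_instance
def pvWitness_quad_sequence : List Int := [1, 2, 4]

def Spec_quad_sequence (lst : List Int) (out : List Int) : Prop := out = quad_sequence_alt lst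
instance (lst : List Int) (out : List Int) : Decidable (Spec_quad_sequence lst out) := by unfold Spec_quad_sequence; infer_instance

-- ===== CLAIM (what is proved, stated in full; the proofs are below) =====
def Claim_equal_quad_sequence : Prop := ∀ (lst : List Int), Dom_quad_sequence lst → Pre_quad_sequence lst → Spec_quad_sequence lst (quad_sequence lst)

-- ===== LEMMAS AND PROOFS =====

-- the closed quadratic form B evaluates
def pvFq (a0 d1 d2 n : Int) : Int := a0 + n * d1 + d2 * PySem.Int.floordiv (n * (n - 1)) 2

theorem pvFloordiv_two_mul (k : Int) : PySem.Int.floordiv (2 * k) 2 = k := by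
  rw [PySem.Int.floordiv_eq_iff_of_pos (by omega)]; omega

-- the closed form has constant second difference d2 (exactly the recurrence A's loop applies)
theorem pvFq_second_diff (a0 d1 d2 n : Int) :
    pvFq a0 d1 d2 (n + 2) = d2 + (pvFq a0 d1 d2 (n + 1) - pvFq a0 d1 d2 n) + pvFq a0 d1 d2 (n + 1) := by
  obtain ⟨k, hk⟩ := Int.even_mul_succ_self (n - 1)
  have h0 : n * (n - 1) = 2 * k := by rw [show n * (n - 1) = (n - 1) * (n - 1 + 1) by ring, hk]; ring
  have h1 : (n + 1) * (n + 1 - 1) = 2 * (k + n) := by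
    rw [show (n+1) * (n+1-1) = n * (n-1) + 2 * n by ring, h0]; ring
  have h2 : (n + 2) * (n + 2 - 1) = 2 * (k + 2 * n + 1) := by
    rw [show (n+2) * (n+2-1) = n * (n-1) + 2 * (2*n+1) by ring, h0]; ring
  simp only [pvFq, h0, h1, h2, pvFloordiv_two_mul]; ring

theorem pvFq_zero (a0 d1 d2 : Int) : pvFq a0 d1 d2 0 = a0 := by
  simp [pvFq]
theorem pvFq_one (a0 d1 d2 : Int) : pvFq a0 d1 d2 1 = d1 + a0 := by
  simp [pvFq]; ring

-- loop invariant of A: after the first k iterations the list holds pvFq 0 .. k+1 and nextnum = pvFq (k+1)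
theorem pvLoop_inv (a0 d1 d2 : Int) (k : Nat) :
    ((List.range k).map (fun (j : Nat) => (1 : Int) + (j : Int))).foldl
      (fun (st : List Int × Int) x =>
        (st.1 ++ [d2 + (st.2 - PySem.List.pyGetD st.1 (x - 1) 0) + st.2],
         d2 + (st.2 - PySem.List.pyGetD st.1 (x - 1) 0) + st.2))
      ([pvFq a0 d1 d2 0, pvFq a0 d1 d2 1], pvFq a0 d1 d2 1)
    = ((List.range (k + 2)).map (fun (j : Nat) => pvFq a0 d1 d2 (j : Int)), pvFq a0 d1 d2 ((k : Int) + 1)) := by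
  induction k with
  | zero => simp [List.range_succ]
  | succ k ih =>
    rw [List.range_succ, List.map_append, List.foldl_append, ih]
    have hidx : PySem.List.pyGetD ((List.range (k + 2)).map (fun (j : Nat) => pvFq a0 d1 d2 (j : Int))) ((1 : Int) + (k : Int) - 1) 0
        = pvFq a0 d1 d2 (k : Int) := by
      have he : (1 : Int) + (k : Int) - 1 = ((k : Nat) : Int) := by omega
      rw [he, PySem.List.pyGetD_natCast]
      simp [List.getD, (by omega : k < k + 2)]
    have hstep : d2 + (pvFq a0 d1 d2 ((k : Int) + 1) - pvFq a0 d1 d2 (k : Int)) + pvFq a0 d1 d2 ((k : Int) + 1)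
        = pvFq a0 d1 d2 (((k : Int) + 1) + 1) := by
      have := pvFq_second_diff a0 d1 d2 (k : Int)
      rw [show ((k : Int) + 1) + 1 = (k : Int) + 2 by ring, this]
    simp only [List.map_cons, List.map_nil, List.foldl_cons, List.foldl_nil, hidx, hstep,
      Prod.mk.injEq]
    refine ⟨?_, by congr 1⟩
    have harg : pvFq a0 d1 d2 ((k : Int) + 1 + 1) = pvFq a0 d1 d2 ((k + 2 : Nat) : Int) := by
      congr 1
    rw [show k + 1 + 2 = (k + 2) + 1 by omega, List.range_succ, List.map_append, harg]
    conv_rhs => rw [List.range_succ, List.range_succ]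
    simp [List.map_append]

theorem quad_sequence_eq (lst : List Int) (h : 3 ≤ lst.length) :
    quad_sequence lst = quad_sequence_alt lst := by
  rcases lst with _ | ⟨a, lst⟩; · simp at h
  rcases lst with _ | ⟨b, lst⟩; · simp at h
  rcases lst with _ | ⟨c, rest⟩; · simp at h
  have h1 : PySem.List.pyGetD (a :: b :: c :: rest) 1 0 = b := by simp [pysem]
  have h2 : PySem.List.pyGetD (a :: b :: c :: rest) 2 0 = c := by simp [pysem]
  simp only [quad_sequence, quad_sequence_alt, PySem.List.len_eq,
    PySem.List.pyGetD_zero_cons, h1, h2, List.length_cons]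
  have hlen : (↑(rest.length + 1 + 1 + 1) : Int) = ((rest.length + 3 : Nat) : Int) := by push_cast; ring
  rw [hlen]
  set N := rest.length with hN
  have hrange : PySem.List.pyRange 1 (2 * ((N + 3 : Nat) : Int) - 1)
      = (List.range (2 * N + 4)).map (fun (j : Nat) => (1 : Int) + (j : Int)) := by
    rw [PySem.List.pyRange_one]
    have ha : ((2 * ((N + 3 : Nat) : Int) - 1) - 1).toNat = 2 * N + 4 := by omega
    rw [ha]
  have hinit : ([a] ++ [b - a + a], b - a + a)
      = (([pvFq a (b - a) (c - b - (b - a)) 0, pvFq a (b - a) (c - b - (b - a)) 1]),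
         pvFq a (b - a) (c - b - (b - a)) 1) := by
    rw [pvFq_zero, pvFq_one]; norm_num
  rw [hrange, hinit, pvLoop_inv a (b - a) (c - b - (b - a)) (2 * N + 4)]
  have hslice : PySem.List.slice ((List.range (2 * N + 4 + 2)).map (fun (j : Nat) => pvFq a (b - a) (c - b - (b - a)) (j : Int))) (some (-((N + 3 : Nat) : Int))) none
      = List.drop (N + 3) ((List.range (2 * N + 4 + 2)).map (fun (j : Nat) => pvFq a (b - a) (c - b - (b - a)) (j : Int))) := by
    rw [PySem.List.slice_from_neg_natCast _ (N + 3) (by omega)]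
    have hl : ((List.range (2 * N + 4 + 2)).map (fun (j : Nat) => pvFq a (b - a) (c - b - (b - a)) (j : Int))).length = 2 * N + 6 := by simp
    rw [hl]
    congr 1
    omega
  rw [hslice]
  rw [show 2 * N + 4 + 2 = (N + 3) + (N + 3) by omega, List.range_add, List.map_append]
  rw [List.drop_left' (by simp)]
  rw [PySem.List.pyRange_one, List.map_map, List.map_map]
  have harg : ((2 * ((N + 3 : Nat) : Int) - ((N + 3 : Nat) : Int)).toNat) = N + 3 := by omega
  rw [harg]
  apply List.map_congr_left
  intro j _
  simp only [Function.comp, pvFq]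
  push_cast
  ring_nf

-- ===== VERDICT (by name: the statement is the Claim_ definition above) =====
theorem quad_sequence_spec : Claim_equal_quad_sequence := by
  intro lst _ hpre
  exact quad_sequence_eq lst hpre
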